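-- pv_equiv track=rewrite | github.com/qiancai/ai-pr-translator | scripts/diff_analyzer.py | trim_content_before_tabs_panel
-- ===== SOURCE A (Python) =====
-- def trim_content_before_tabs_panel(content):
--     """Trim section content at the first TabsPanel line."""
--     if not isinstance(content, str) or not content:
--         return content, False
--
--     lines = content.split('\n')
--     for idx, line in enumerate(lines):
--         if "<TabsPanel" in line:
--             trimmed = "\n".join(lines[:idx]).rstrip()
--             return trimmed, True
--     return content, False
-- ===== SOURCE B (Python) =====
-- def trim_content_before_tabs_panel(content):
--     """Trim section content at the first TabsPanel line."""
--     if not isinstance(content, str) or not content: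
--         return content, False
--
--     idx = content.find("<TabsPanel")
--     if idx == -1:
--         return content, False
--     nl = content.rfind("\n", 0, idx)
--     trimmed = ("" if nl == -1 else content[:nl]).rstrip()
--     return trimmed, True
-- ===== Notes on version B (the rewrite author's own statement) =====
-- stated objective: alternative
-- what changed: Instead of splitting the content into a list of lines and scanning them for the marker, B locates the first occurrence of the TabsPanel marker with str.find and cuts at the last newline before it via str.rfind, never materialising a line list.
import Mathlib
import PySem

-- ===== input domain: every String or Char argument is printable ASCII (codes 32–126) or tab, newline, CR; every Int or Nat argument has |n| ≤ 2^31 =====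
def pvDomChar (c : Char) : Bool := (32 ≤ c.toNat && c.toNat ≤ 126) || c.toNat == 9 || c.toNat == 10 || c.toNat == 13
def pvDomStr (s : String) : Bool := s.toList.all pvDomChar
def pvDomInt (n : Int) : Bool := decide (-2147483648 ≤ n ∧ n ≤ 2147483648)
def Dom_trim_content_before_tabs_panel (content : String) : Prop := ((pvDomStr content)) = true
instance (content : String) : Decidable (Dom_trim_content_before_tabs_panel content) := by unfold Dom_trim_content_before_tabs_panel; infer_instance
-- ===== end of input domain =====

-- B replaces A's split-into-lines-and-scan with str.find for the TabsPanel marker plus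
-- str.rfind for the preceding newline; no line list is built.

-- ===== PORT A =====
-- the for-loop over enumerate(lines) with early return: yields the index of the
-- first line containing "<TabsPanel", if any
def trimA_find (lines : List (List Char)) (idx : Nat) : Option Nat :=
  match lines with
  | [] => none
  | line :: rest =>
    if PySem.Chars.isIn "<TabsPanel".toList line then some idx
    else trimA_find rest (idx + 1)

def trim_content_before_tabs_panel (content : String) : String × Bool :=
  if content = "" then (content, false)
  else
    let lines := PySem.Chars.splitOn content.toList "\n".toList
    match trimA_find lines 0 with
    | some idx =>
        (String.ofList (PySem.Chars.rstrip (PySem.Chars.join "\n".toList (lines.take idx))), true)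
    | none => (content, false)

-- ===== PORT B =====
def trim_content_before_tabs_panel_alt (content : String) : String × Bool :=
  if content = "" then (content, false)
  else
    let idx := PySem.Str.find content "<TabsPanel"
    if idx = -1 then (content, false)
    else
      let nl := PySem.Str.rfindFrom content "\n" 0 (some idx)
      let trimmed := if nl = -1 then "" else PySem.Str.slice content none (some nl)
      (PySem.Str.rstrip trimmed, true)

-- ===== PRECONDITION & SPEC =====
def Spec_trim_content_before_tabs_panel (content : String) (out : String × Bool) : Prop := out = trim_content_before_tabs_panel_alt content
instance (content : String) (out : String × Bool) : Decidable (Spec_trim_content_before_tabs_panel content out) := by unfold Spec_trim_content_before_tabs_panel; infer_instance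

-- ===== CLAIM (what is proved, stated in full; the proofs are below) =====
def Claim_equal_trim_content_before_tabs_panel : Prop := ∀ (content : String), Dom_trim_content_before_tabs_panel content → Spec_trim_content_before_tabs_panel content (trim_content_before_tabs_panel content)

-- ===== LEMMAS AND PROOFS =====


def sr : List Char → List (List Char)
  | [] => [[]]
  | c :: t => if c = '\n' then [] :: sr t else (sr t).modifyHead (c :: ·)

theorem sr_ne_nil (cs : List Char) : sr cs ≠ [] := by
  induction cs with
  | nil => simp [sr]
  | cons c t ih =>
    simp only [sr]
    split
    · simp
    · cases h : sr t with
      | nil => exact absurd h ih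
      | cons a l => simp [List.modifyHead]

theorem go_split (fuel : Nat) (l cur : List Char) (acc : List (List Char))
    (h : l.length ≤ fuel) :
    PySem.Chars.splitOn.go ['\n'] fuel l cur acc
      = acc.reverse ++ (sr l).modifyHead (cur.reverse ++ ·) := by
  induction fuel generalizing l cur acc with
  | zero =>
    have : l = [] := by cases l <;> simp_all
    subst this
    simp [PySem.Chars.splitOn.go, sr]
  | succ f ih =>
    cases l with
    | nil => simp [PySem.Chars.splitOn.go, sr]
    | cons c rest =>
      simp only [PySem.Chars.splitOn.go]
      by_cases hc : c = '\n'
      · subst hc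
        rw [if_pos (by simp [List.isPrefixOf])]
        rw [ih _ _ _ (by simpa using Nat.lt_succ_iff.mp (by simpa using h))]
        simp only [sr]
        cases hsr : sr rest with
        | nil => exact absurd hsr (sr_ne_nil rest)
        | cons a t => simp [List.modifyHead, hsr]
      · rw [if_neg (by simp [List.isPrefixOf]; intro hh; exact absurd hh.symm hc)]
        rw [ih _ _ _ (by simpa using Nat.lt_succ_iff.mp (by simpa using h))]
        simp only [sr, if_neg hc]
        cases hsr : sr rest with
        | nil => exact absurd hsr (sr_ne_nil rest)
        | cons a t => simp [List.modifyHead]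

theorem splitOn_eq_sr (cs : List Char) : PySem.Chars.splitOn cs ['\n'] = sr cs := by
  rw [PySem.Chars.splitOn, go_split _ _ _ _ (by omega)]
  cases h : sr cs with
  | nil => exact absurd h (sr_ne_nil cs)
  | cons a t => simp [List.modifyHead]

theorem sr_no_nl (cs : List Char) (h : '\n' ∉ cs) : sr cs = [cs] := by
  induction cs with
  | nil => simp [sr]
  | cons c t ih =>
    simp only [List.mem_cons, not_or] at h
    simp [sr, Ne.symm h.1, ih h.2, List.modifyHead]

theorem sr_append (L R : List Char) (h : '\n' ∉ L) :
    sr (L ++ '\n' :: R) = L :: sr R := by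
  induction L with
  | nil => simp [sr]
  | cons c t ih =>
    simp only [List.mem_cons, not_or] at h
    simp [List.cons_append, sr, if_neg (Ne.symm h.1), ih h.2, List.modifyHead]

theorem join_sr (cs : List Char) : PySem.Chars.join ['\n'] (sr cs) = cs := by
  induction cs with
  | nil => simp [sr, PySem.Chars.join_singleton]
  | cons c t ih =>
    simp only [sr]
    by_cases hc : c = '\n'
    · subst hc
      rw [if_pos rfl]
      cases hsr : sr t with
      | nil => exact absurd hsr (sr_ne_nil t)
      | cons a l =>
        rw [PySem.Chars.join_cons_cons]
        rw [hsr] at ih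
        simp [ih]
    · rw [if_neg hc]
      cases hsr : sr t with
      | nil => exact absurd hsr (sr_ne_nil t)
      | cons a l =>
        rw [hsr] at ih
        cases l with
        | nil => simp_all [List.modifyHead, PySem.Chars.join_singleton]
        | cons b l' =>
          rw [PySem.Chars.join_cons_cons] at ih
          simp [List.modifyHead, PySem.Chars.join_cons_cons, ih]

theorem join_take_prefix (xs : List (List Char)) (k : Nat) :
    PySem.Chars.join ['\n'] (xs.take k) <+: PySem.Chars.join ['\n'] xs := by
  induction xs generalizing k with
  | nil => simp
  | cons a t ih =>
    cases k with
    | zero => simp [PySem.Chars.join_nil]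
    | succ k' =>
      simp only [List.take_succ_cons]
      cases t with
      | nil => simp
      | cons b t' =>
        cases hk : (b :: t').take k' with
        | nil =>
          have : k' = 0 := by cases k' <;> simp_all
          subst this
          simp [PySem.Chars.join_singleton, PySem.Chars.join_cons_cons]
        | cons u v =>
          rw [PySem.Chars.join_cons_cons, PySem.Chars.join_cons_cons]
          have h2 := ih (k := k')
          rw [hk] at h2
          obtain ⟨r, hr⟩ := h2
          exact ⟨r, by rw [List.append_assoc, List.append_assoc, hr, List.append_assoc]⟩

theorem findgo_shift (sub s : List Char) (k : Nat) :
    PySem.Chars.find.go sub s k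
      = if PySem.Chars.find s sub = -1 then -1 else (k : Int) + PySem.Chars.find s sub := by
  induction s generalizing k with
  | nil =>
    simp only [PySem.Chars.find, PySem.Chars.find.go]
    split <;> simp_all
  | cons x t ih =>
    rw [PySem.Chars.find]
    simp only [PySem.Chars.find.go]
    by_cases hp : sub.isPrefixOf (x :: t)
    · simp [hp]
    · simp only [hp, if_false, Bool.false_eq_true]
      rw [ih (k+1), ih 1]
      have hge := PySem.Chars.neg_one_le_find t sub
      by_cases hf : PySem.Chars.find t sub = -1
      · simp [hf]
      · rw [if_neg hf, if_neg hf, if_neg (by omega)]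
        push_cast; ring

theorem find_cons (x : Char) (t sub : List Char) :
    PySem.Chars.find (x :: t) sub
      = if sub.isPrefixOf (x :: t) then 0
        else if PySem.Chars.find t sub = -1 then -1 else 1 + PySem.Chars.find t sub := by
  rw [PySem.Chars.find]
  simp only [PySem.Chars.find.go]
  by_cases hp : sub.isPrefixOf (x :: t)
  · simp [hp]
  · simp only [hp, if_false, Bool.false_eq_true]
    rw [findgo_shift]
    split <;> simp

theorem prefix_of_append_of_le (sub L x : List Char) (h : sub <+: L ++ x)
    (hl : sub.length ≤ L.length) : sub <+: L := by
  rw [List.prefix_iff_eq_take] at h ⊢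
  rwa [List.take_append, Nat.sub_eq_zero_of_le hl, List.take_zero, List.append_nil] at h

theorem mem_of_prefix_append_of_lt (sub L : List Char) (c : Char) (R : List Char)
    (h : sub <+: L ++ c :: R) (hl : L.length < sub.length) : c ∈ sub := by
  have hlen : sub.length ≤ (L ++ c :: R).length := h.length_le
  have hget := h.getElem (i := L.length) hl
  rw [List.getElem_append_right (Nat.le_refl L.length)] at hget
  simp at hget
  rw [← hget]
  exact List.getElem_mem _

theorem find_append_of_infix (sub L x : List Char) (h : sub <:+: L) :
    PySem.Chars.find (L ++ x) sub = PySem.Chars.find L sub := by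
  induction L with
  | nil =>
    have : sub = [] := List.infix_nil.mp h
    subst this
    simp [PySem.Chars.find_nil]
  | cons a L' ih =>
    rw [List.cons_append, find_cons, find_cons]
    by_cases hp : sub.isPrefixOf (a :: L')
    · have : sub.isPrefixOf ((a :: L') ++ x) := by
        rw [List.isPrefixOf_iff_prefix] at hp ⊢
        exact hp.trans (List.prefix_append _ _)
      rw [if_pos hp]
      rw [List.cons_append] at this
      rw [if_pos this]
    · have hinf : sub <:+: L' := by
        rcases List.infix_cons_iff.mp h with h1 | h1
        · exact absurd (List.isPrefixOf_iff_prefix.mpr h1) hp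
        · exact h1
      have hlen : sub.length ≤ L'.length := hinf.length_le
      have hp2 : ¬ sub.isPrefixOf (a :: (L' ++ x)) := by
        rw [List.isPrefixOf_iff_prefix]
        intro hc
        exact hp (List.isPrefixOf_iff_prefix.mpr
          (prefix_of_append_of_le sub (a :: L') x (by simpa using hc) (by simpa using Nat.le_succ_of_le hlen)))
      rw [if_neg hp2, if_neg hp, ih hinf]

theorem find_across_nl (sub L R : List Char) (hne : sub ≠ []) (hnl : '\n' ∉ sub)
    (hni : ¬ sub <:+: L) :
    PySem.Chars.find (L ++ '\n' :: R) sub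
      = if PySem.Chars.find R sub = -1 then -1
        else ((L.length : Int) + 1) + PySem.Chars.find R sub := by
  induction L with
  | nil =>
    rw [List.nil_append, find_cons]
    have hp : ¬ sub.isPrefixOf ('\n' :: R) := by
      rw [List.isPrefixOf_iff_prefix]
      intro hc
      exact hnl (mem_of_prefix_append_of_lt sub [] '\n' R (by simpa using hc)
        (by cases sub <;> simp_all))
    rw [if_neg hp]
    split <;> simp
  | cons a L' ih =>
    have hni' : ¬ sub <:+: L' := fun hc => hni (List.infix_cons_iff.mpr (Or.inr hc))
    rw [List.cons_append, find_cons]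
    have hp : ¬ sub.isPrefixOf (a :: (L' ++ '\n' :: R)) := by
      rw [List.isPrefixOf_iff_prefix]
      intro hc
      by_cases hlen : sub.length ≤ (a :: L').length
      · exact hni ((prefix_of_append_of_le sub (a :: L') ('\n' :: R) (by simpa using hc) hlen).isInfix)
      · exact hnl (mem_of_prefix_append_of_lt sub (a :: L') '\n' R (by simpa using hc) (by omega))
    rw [if_neg hp, ih hni']
    have hge := PySem.Chars.neg_one_le_find R sub
    by_cases hf : PySem.Chars.find R sub = -1
    · simp [hf]
    · rw [if_neg hf, if_neg (by omega), if_neg hf]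
      simp only [List.length_cons]
      push_cast; ring

theorem single_prefix_iff (c : Char) (x : List Char) : [c] <+: x ↔ x.head? = some c := by
  cases x with
  | nil => simp
  | cons a t => simp [List.cons_prefix_cons, eq_comm]

theorem occ_iff (s : List Char) (c : Char) (j : Nat) :
    [c].isPrefixOf (s.drop j) = true ↔ s[j]? = some c := by
  rw [List.isPrefixOf_iff_prefix, single_prefix_iff, List.head?_drop]

theorem rgo_spec (s : List Char) (c : Char) (m : Nat) :
    (PySem.Chars.rfind.go s [c] m = -1 ∧ ∀ j ≤ m, s[j]? ≠ some c) ∨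
    (∃ j : Nat, j ≤ m ∧ PySem.Chars.rfind.go s [c] m = (j : Int) ∧ s[j]? = some c ∧
      ∀ j', j < j' → j' ≤ m → s[j']? ≠ some c) := by
  induction m with
  | zero =>
    simp only [PySem.Chars.rfind.go]
    by_cases h : [c].isPrefixOf s
    · right
      refine ⟨0, le_refl _, by simp [h], ?_, by omega⟩
      simpa using (occ_iff s c 0).mp (by simpa using h)
    · left
      refine ⟨by simp [h], ?_⟩
      intro j hj
      interval_cases j
      exact fun hc => h (by simpa using (occ_iff s c 0).mpr hc)
  | succ m ih =>
    simp only [PySem.Chars.rfind.go]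
    by_cases h : [c].isPrefixOf (s.drop (m + 1))
    · right
      exact ⟨m + 1, le_refl _, by simp [h], (occ_iff s c (m+1)).mp h, by omega⟩
    · have hocc : s[m+1]? ≠ some c := fun hc => h ((occ_iff s c (m+1)).mpr hc)
      rcases ih with ⟨h1, h2⟩ | ⟨j, hj, h1, h2, h3⟩
      · left
        refine ⟨by simp [h, h1], ?_⟩
        intro j hj
        rcases Nat.lt_succ_iff_lt_or_eq.mp (Nat.lt_succ_of_le hj) with h' | h'
        · exact h2 j (by omega)
        · subst h'; exact hocc
      · right
        refine ⟨j, by omega, by simp [h, h1], h2, ?_⟩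
        intro j' hlt hle
        rcases Nat.lt_succ_iff_lt_or_eq.mp (Nat.lt_succ_of_le hle) with h' | h'
        · exact h3 j' hlt (by omega)
        · subst h'; exact hocc

theorem neg_one_le_rfind (s : List Char) (c : Char) : -1 ≤ PySem.Chars.rfind s [c] := by
  rw [PySem.Chars.rfind]
  rcases rgo_spec s c s.length with ⟨h, _⟩ | ⟨j, _, h, _, _⟩ <;> rw [h] <;> omega

theorem rfind_of_not_mem (s : List Char) (c : Char) (h : c ∉ s) :
    PySem.Chars.rfind s [c] = -1 := by
  rw [PySem.Chars.rfind]
  rcases rgo_spec s c s.length with ⟨h1, _⟩ | ⟨j, _, _, h2, _⟩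
  · exact h1
  · exact absurd (List.mem_of_getElem? h2) h

theorem rfind_append_nl (L X : List Char) (h : '\n' ∉ L) :
    PySem.Chars.rfind (L ++ '\n' :: X) ['\n']
      = if PySem.Chars.rfind X ['\n'] = -1 then (L.length : Int)
        else ((L.length : Int) + 1) + PySem.Chars.rfind X ['\n'] := by
  have key : ∀ j : Nat, (L ++ '\n' :: X)[j]? = some '\n' ↔ (j = L.length ∨ (L.length < j ∧ X[j - L.length - 1]? = some '\n')) := by
    intro j
    rcases lt_trichotomy j L.length with hj | hj | hj
    · rw [List.getElem?_append_left hj]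
      simp only [hj.ne, false_or]
      constructor
      · intro hc; exact absurd (List.mem_of_getElem? hc) h
      · omega
    · subst hj
      rw [List.getElem?_append_right (le_refl _)]
      simp
    · rw [List.getElem?_append_right (by omega)]
      have : j - L.length = (j - L.length - 1) + 1 := by omega
      rw [this, List.getElem?_cons_succ]
      constructor
      · intro hc; exact Or.inr ⟨hj, hc⟩
      · rintro (hc | ⟨_, hc⟩); · omega
        · exact hc
  rw [PySem.Chars.rfind, PySem.Chars.rfind]
  by_cases hX : PySem.Chars.rfind.go X ['\n'] X.length = -1
  · rw [if_pos hX]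
    rcases rgo_spec X '\n' X.length with ⟨_, h2X⟩ | ⟨j, _, h1X, _, _⟩
    · -- no newline in X at positions ≤ |X|; also none beyond length
      have hXnone : ∀ jx : Nat, X[jx]? ≠ some '\n' := by
        intro jx
        by_cases hjx : jx ≤ X.length
        · exact h2X jx hjx
        · rw [List.getElem?_eq_none (by omega)]; simp
      rcases rgo_spec (L ++ '\n' :: X) '\n' (L ++ '\n' :: X).length with ⟨h1, h2⟩ | ⟨j, hj, h1, h2, h3⟩
      · exfalso
        exact h2 L.length (by simp) ((key L.length).mpr (Or.inl rfl))
      · rw [h1]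
        rcases (key j).mp h2 with hc | ⟨_, hc⟩
        · exact_mod_cast hc
        · exact absurd hc (hXnone _)
    · rw [h1X] at hX; exact absurd hX (by simp)
  · rw [if_neg hX]
    rcases rgo_spec X '\n' X.length with ⟨h1X, _⟩ | ⟨jX, hjX, h1X, h2X, h3X⟩
    · exact absurd h1X hX
    · rcases rgo_spec (L ++ '\n' :: X) '\n' (L ++ '\n' :: X).length with ⟨h1, h2⟩ | ⟨j, hj, h1, h2, h3⟩
      · exfalso
        exact h2 L.length (by simp) ((key L.length).mpr (Or.inl rfl))
      · rw [h1, h1X]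
        have hXnone : ∀ jx : Nat, jX < jx → X[jx]? ≠ some '\n' := by
          intro jx hlt
          by_cases hjx : jx ≤ X.length
          · exact h3X jx hlt hjx
          · rw [List.getElem?_eq_none (by omega)]; simp
        have hj' : j = L.length + 1 + jX := by
          rcases (key j).mp h2 with hc | ⟨hgt, hc⟩
          · -- j = |L|, but occurrence at |L|+1+jX contradicts maximality
            exfalso
            exact h3 (L.length + 1 + jX) (by omega) (by simp; omega)
              ((key _).mpr (Or.inr ⟨by omega, by
                have harr : L.length + 1 + jX - L.length - 1 = jX := by omega
                rw [harr]; exact h2X⟩))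
          · -- occurrence in X at j - |L| - 1
            have hle : j - L.length - 1 ≤ jX := by
              by_contra hcon
              exact hXnone _ (by omega) hc
            have hge : L.length + 1 + jX ≤ j := by
              by_contra hcon
              exact h3 (L.length + 1 + jX) (by omega) (by simp; omega)
                ((key _).mpr (Or.inr ⟨by omega, by
                  have harr : L.length + 1 + jX - L.length - 1 = jX := by omega
                  rw [harr]; exact h2X⟩))
            omega
        subst hj'
        push_cast; ring

theorem rfindFrom_take (s : List Char) (i : Int) (h0 : 0 ≤ i) (h1 : i ≤ (s.length : Int)) :
    PySem.Chars.rfindFrom s ['\n'] 0 (some i) = PySem.Chars.rfind (s.take i.toNat) ['\n'] := by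
  rw [PySem.Chars.rfindFrom]
  simp only [if_neg (show ¬ ((s.length:Int) < i) by omega), if_neg (show ¬ (i < 0) by omega),
    if_neg (show ¬ ((0:Int) < 0) by omega), Int.toNat_zero, List.drop_zero]
  split <;> simp_all

-- the abstract "cut position" computed by each side: none = marker absent,
-- some none = cut before the first line, some (some p) = cut at position p
def aCut (cs : List Char) : Option (Option Nat) :=
  (trimA_find (sr cs) 0).map (fun k =>
    if k = 0 then none
    else some (PySem.Chars.join ['\n'] ((sr cs).take k)).length)

def bCut (cs : List Char) : Option (Option Nat) :=
  let i := PySem.Chars.find cs "<TabsPanel".toList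
  if i = -1 then none
  else
    let nl := PySem.Chars.rfind (cs.take i.toNat) ['\n']
    some (if nl = -1 then none else some nl.toNat)

theorem trimA_find_shift (lines : List (List Char)) (j : Nat) :
    trimA_find lines j = (trimA_find lines 0).map (fun k => k + j) := by
  induction lines generalizing j with
  | nil => simp [trimA_find]
  | cons a rest ih =>
    simp only [trimA_find]
    split
    · simp
    · rw [ih (j + 1), ih 1]
      cases trimA_find rest 0 <;> simp <;> omega

theorem exists_nl_split (cs : List Char) (h : '\n' ∈ cs) :
    ∃ L R, cs = L ++ '\n' :: R ∧ '\n' ∉ L := by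
  induction cs with
  | nil => simp at h
  | cons c t ih =>
    by_cases hc : c = '\n'
    · exact ⟨[], t, by simp [hc], by simp⟩
    · have : '\n' ∈ t := by rcases List.mem_cons.mp h with h' | h' <;> [exact absurd h'.symm hc; exact h']
      obtain ⟨L, R, h1, h2⟩ := ih this
      exact ⟨c :: L, R, by simp [h1], by simp [h2, Ne.symm hc]⟩

theorem cut_eq (cs : List Char) : aCut cs = bCut cs := by
  have hsubne : "<TabsPanel".toList ≠ [] := by decide
  have hsubnl : '\n' ∉ "<TabsPanel".toList := by decide
  induction hmeas : cs.length using Nat.strong_induction_on generalizing cs with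
  | _ n ih =>
  by_cases hmem : '\n' ∈ cs
  · obtain ⟨L, R, hcs, hL⟩ := exists_nl_split cs hmem
    subst hcs
    have hRlen : R.length < n := by simp at hmeas; omega
    have hIH := ih R.length hRlen R rfl
    simp only [aCut, bCut, sr_append L R hL, trimA_find]
    by_cases hin : PySem.Chars.isIn "<TabsPanel".toList L = true
    · -- marker in the first line
      have hinf : "<TabsPanel".toList <:+: L := (PySem.Chars.isIn_iff_infix _ _).mp hin
      have hfind : PySem.Chars.find (L ++ '\n' :: R) "<TabsPanel".toList
          = PySem.Chars.find L "<TabsPanel".toList := find_append_of_infix _ _ _ hinf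
      have hge : 0 ≤ PySem.Chars.find L "<TabsPanel".toList :=
        (PySem.Chars.find_nonneg_iff _ _).mpr hinf
      have hle := PySem.Chars.find_le_length L "<TabsPanel".toList
      rw [if_pos hin, hfind, if_neg (by omega)]
      have htake : (L ++ '\n' :: R).take (PySem.Chars.find L "<TabsPanel".toList).toNat
          = L.take (PySem.Chars.find L "<TabsPanel".toList).toNat := by
        rw [List.take_append, Nat.sub_eq_zero_of_le (by omega), List.take_zero, List.append_nil]
      rw [htake, rfind_of_not_mem _ _ (fun hc => hL (List.mem_of_mem_take hc))]
      simp
    · -- marker not in the first line: compose with the tail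
      have hninf : ¬ "<TabsPanel".toList <:+: L :=
        fun hc => hin ((PySem.Chars.isIn_iff_infix _ _).mpr hc)
      have hfind := find_across_nl "<TabsPanel".toList L R hsubne hsubnl hninf
      rw [if_neg hin, trimA_find_shift (sr R) 1, hfind]
      simp only [aCut, bCut] at hIH
      by_cases hfR : PySem.Chars.find R "<TabsPanel".toList = -1
      · -- not found anywhere
        have : trimA_find (sr R) 0 = none := by
          rcases h : trimA_find (sr R) 0 with _ | k
          · rfl
          · rw [h, if_pos hfR] at hIH; simp at hIH
        rw [if_pos hfR, this]
        simp
      · have hgeR : 0 ≤ PySem.Chars.find R "<TabsPanel".toList := by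
          have := PySem.Chars.neg_one_le_find R "<TabsPanel".toList; omega
        rw [if_neg hfR]
        rw [if_neg hfR] at hIH
        rcases h : trimA_find (sr R) 0 with _ | k
        · rw [h] at hIH; simp at hIH
        · rw [h] at hIH
          simp only [Option.map_some, Option.some.injEq] at hIH
          have htoNat : ((L.length : Int) + 1 + PySem.Chars.find R "<TabsPanel".toList).toNat
              = L.length + 1 + (PySem.Chars.find R "<TabsPanel".toList).toNat := by omega
          have htake : (L ++ '\n' :: R).take
                ((L.length : Int) + 1 + PySem.Chars.find R "<TabsPanel".toList).toNat
              = L ++ '\n' :: R.take (PySem.Chars.find R "<TabsPanel".toList).toNat := by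
            rw [htoNat, List.take_append, List.take_of_length_le (by omega)]
            congr 1
            have : L.length + 1 + (PySem.Chars.find R "<TabsPanel".toList).toNat - L.length
                = (PySem.Chars.find R "<TabsPanel".toList).toNat + 1 := by omega
            rw [this, List.take_succ_cons]
          rw [if_neg (by omega), htake, rfind_append_nl _ _ hL]
          have hrge := neg_one_le_rfind (R.take (PySem.Chars.find R "<TabsPanel".toList).toNat) '\n'
          by_cases hk : k = 0
          · -- cut before the first line of R
            subst hk
            rw [if_pos rfl] at hIH
            have hnlR : PySem.Chars.rfind
                (R.take (PySem.Chars.find R "<TabsPanel".toList).toNat) ['\n'] = -1 := by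
              by_contra hcon
              rw [if_neg hcon] at hIH; simp at hIH
            rw [if_pos hnlR]
            simp only [Option.map_some]
            rw [if_neg (show ¬ ((L.length:Int) = -1) by omega)]
            simp [PySem.Chars.join_singleton]
          · -- cut inside R at position nlR
            rw [if_neg hk] at hIH
            set nlR := PySem.Chars.rfind
              (R.take (PySem.Chars.find R "<TabsPanel".toList).toNat) ['\n'] with hnlR_def
            by_cases hcon : nlR = -1
            · rw [if_pos hcon] at hIH; simp at hIH
            · rw [if_neg hcon] at hIH
              simp only [Option.some.injEq] at hIH
              rw [if_neg hcon]
              rw [if_neg (show ¬ ((L.length:Int) + 1 + nlR = -1) by omega)]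
              simp only [Option.map_some]
              rw [if_neg (show ¬ (k + 1 = 0) by omega)]
              -- compute the joined prefix length
              obtain ⟨k', rfl⟩ : ∃ k', k = k' + 1 := ⟨k - 1, by omega⟩
              cases hsr : sr R with
              | nil => exact absurd hsr (sr_ne_nil R)
              | cons a t =>
                rw [hsr] at hIH
                simp only [List.take_succ_cons] at hIH ⊢
                rw [PySem.Chars.join_cons_cons]
                simp only [List.length_append, List.length_cons, List.length_nil,
                  Option.some.injEq]
                omega
  · -- single line: no newline in cs
    simp only [aCut, bCut, sr_no_nl cs hmem, trimA_find]
    by_cases hin : PySem.Chars.isIn "<TabsPanel".toList cs = true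
    · have hinf := (PySem.Chars.isIn_iff_infix _ _).mp hin
      have hge : 0 ≤ PySem.Chars.find cs "<TabsPanel".toList :=
        (PySem.Chars.find_nonneg_iff _ _).mpr hinf
      rw [if_pos hin, if_neg (by omega),
        rfind_of_not_mem _ _ (fun hc => hmem (List.mem_of_mem_take hc))]
      simp
    · have : PySem.Chars.find cs "<TabsPanel".toList = -1 :=
        (PySem.Chars.find_eq_neg_one_iff _ _).mpr
          (fun hc => hin ((PySem.Chars.isIn_iff_infix _ _).mpr hc))
      rw [if_neg hin, if_pos this]
      simp

-- ===== VERDICT (by name: the statement is the Claim_ definition above) =====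
theorem trim_content_before_tabs_panel_spec : Claim_equal_trim_content_before_tabs_panel := by
  unfold Claim_equal_trim_content_before_tabs_panel Spec_trim_content_before_tabs_panel
  intro content _
  unfold trim_content_before_tabs_panel trim_content_before_tabs_panel_alt
  by_cases hc : content = ""
  · simp [hc]
  · rw [if_neg hc, if_neg hc]
    have hsplit : PySem.Chars.splitOn content.toList "\n".toList = sr content.toList := by
      rw [show ("\n" : String).toList = ['\n'] from rfl, splitOn_eq_sr]
    have hcut := cut_eq content.toList
    simp only [hsplit]
    rcases h : trimA_find (sr content.toList) 0 with _ | k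
    · -- no line contains the marker: both return (content, false)
      have hbnone : bCut content.toList = none := by rw [← hcut]; simp only [aCut, h, Option.map_none]
      have hfind : PySem.Chars.find content.toList "<TabsPanel".toList = -1 := by
        by_contra hcon
        rw [bCut] at hbnone
        simp only [if_neg hcon] at hbnone
        simp at hbnone
      have hfindS : PySem.Str.find content "<TabsPanel" = -1 := hfind
      rw [hfindS, if_pos rfl]
    · -- line k contains the marker
      have hbsome : bCut content.toList
          = some (if k = 0 then none
                  else some (PySem.Chars.join ['\n'] ((sr content.toList).take k)).length) := by
        rw [← hcut, aCut, h, Option.map_some]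
      have hfind_ne : PySem.Chars.find content.toList "<TabsPanel".toList ≠ -1 := by
        intro hcon
        rw [bCut] at hbsome
        simp only [if_pos hcon] at hbsome
        simp at hbsome
      have hge : 0 ≤ PySem.Chars.find content.toList "<TabsPanel".toList := by
        have := PySem.Chars.neg_one_le_find content.toList "<TabsPanel".toList
        omega
      have hb : (if PySem.Chars.rfind
            (content.toList.take (PySem.Chars.find content.toList "<TabsPanel".toList).toNat) ['\n'] = -1
          then (none : Option Nat)
          else some (PySem.Chars.rfind
            (content.toList.take (PySem.Chars.find content.toList "<TabsPanel".toList).toNat) ['\n']).toNat)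
          = (if k = 0 then none
             else some (PySem.Chars.join ['\n'] ((sr content.toList).take k)).length) := by
        rw [bCut] at hbsome
        simp only [if_neg hfind_ne, Option.some.injEq] at hbsome
        exact hbsome
      have hfindS_ne : ¬ PySem.Str.find content "<TabsPanel" = -1 := hfind_ne
      rw [if_neg hfindS_ne]
      have hrfrom : PySem.Str.rfindFrom content "\n" 0 (some (PySem.Str.find content "<TabsPanel"))
          = PySem.Chars.rfind
              (content.toList.take (PySem.Chars.find content.toList "<TabsPanel".toList).toNat) ['\n'] := by
        have : PySem.Str.rfindFrom content "\n" 0 (some (PySem.Str.find content "<TabsPanel"))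
            = PySem.Chars.rfindFrom content.toList ['\n'] 0
                (some (PySem.Chars.find content.toList "<TabsPanel".toList)) := rfl
        rw [this, rfindFrom_take _ _ hge (PySem.Chars.find_le_length _ _)]
      rw [hrfrom]
      set nl := PySem.Chars.rfind
        (content.toList.take (PySem.Chars.find content.toList "<TabsPanel".toList).toNat) ['\n'] with hnldef
      have hnlge : -1 ≤ nl := neg_one_le_rfind _ _
      by_cases hk : k = 0
      · -- cut is empty
        subst hk
        rw [if_pos rfl] at hb
        have hnl : nl = -1 := by
          by_contra hcon
          rw [if_neg hcon] at hb
          simp at hb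
        rw [if_pos hnl]
        simp only [List.take_zero, PySem.Chars.join_nil]
        rfl
      · -- cut at position nl
        rw [if_neg hk] at hb
        have hnl_ne : nl ≠ -1 := by
          intro hcon
          rw [if_pos hcon] at hb
          simp at hb
        rw [if_neg hnl_ne] at hb ⊢
        have hplen : (PySem.Chars.join ['\n'] ((sr content.toList).take k)).length = nl.toNat :=
          (Option.some.inj hb).symm
        have hpre : PySem.Chars.join ['\n'] ((sr content.toList).take k) <+: content.toList := by
          have := join_take_prefix (sr content.toList) k
          rwa [join_sr] at this
        have hjoin : PySem.Chars.join ['\n'] ((sr content.toList).take k)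
            = content.toList.take nl.toNat := by
          rw [← hplen]
          exact List.prefix_iff_eq_take.mp hpre
        have hslice : (PySem.Str.slice content none (some nl)).toList
            = content.toList.take nl.toNat := by
          rw [PySem.Str.toList_slice, PySem.Chars.slice_eq_listSlice,
            PySem.List.slice_to _ (by omega : (0:Int) ≤ nl)]
        have : PySem.Str.rstrip (PySem.Str.slice content none (some nl))
            = String.ofList (PySem.Chars.rstrip (content.toList.take nl.toNat)) := by
          rw [PySem.Str.rstrip, hslice]
        rw [this]
        show (String.ofList (PySem.Chars.rstrip
          (PySem.Chars.join "\n".toList (List.take k (sr content.toList)))), true) = _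
        rw [show ("\n" : String).toList = ['\n'] from rfl, hjoin]
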